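-- pv_equiv track=rewrite | github.com/FajarMerahDiwangkara/SHA256CNF | Sha256Binary.py | _rotate_right_binary_zfill
-- ===== SOURCE A (Python) =====
-- import string
--
-- def _rotate_right_binary_zfill(num: string, shift: int, size: int = 32) -> string:
--     """Rotate an integer right."""
--     if size < 0:
--         raise ValueError("Error: shift value less than 0")
--     if size == 0:
--         return ""
--     else:
--         if len(num) < size:
--             num = num.zfill(size)
--         shift = shift % size
--         to_join = []
--         for i in range(size):
--             left_bit = None
--             right_bit = None
--             if i - shift >= 0:
--                 left_bit = num[i-shift]
--             else:
--                 left_bit = "0"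
--             if i + size-shift < size:
--                 right_bit = num[i + size-shift]
--             else:
--                 right_bit = "0"
--             if left_bit == "1" or right_bit == "1":
--                 to_join.append("1")
--             else:
--                 to_join.append("0")
--         return "".join(to_join)
-- ===== SOURCE B (Python) =====
-- def _rotate_right_binary_zfill(num: str, shift: int, size: int = 32) -> str:
--     """Rotate an integer right."""
--     if size < 0:
--         raise ValueError("Error: shift value less than 0")
--     if size == 0:
--         return ""
--     if len(num) < size:
--         num = num.zfill(size)
--     bits = ''.join('1' if c == '1' else '0' for c in num[:size])
--     k = size - shift % size
--     return bits[k:] + bits[:k]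
-- ===== Notes on version B (the rewrite author's own statement) =====
-- stated objective: simpler
-- what changed: Replaced A's per-index loop that ORs a 'left bit' and a 'right bit' picked by range tests with a single per-char normalization pass over num[:size] followed by a two-slice rotation concatenation bits[size-shift%size:] + bits[:size-shift%size].
import Mathlib
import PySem

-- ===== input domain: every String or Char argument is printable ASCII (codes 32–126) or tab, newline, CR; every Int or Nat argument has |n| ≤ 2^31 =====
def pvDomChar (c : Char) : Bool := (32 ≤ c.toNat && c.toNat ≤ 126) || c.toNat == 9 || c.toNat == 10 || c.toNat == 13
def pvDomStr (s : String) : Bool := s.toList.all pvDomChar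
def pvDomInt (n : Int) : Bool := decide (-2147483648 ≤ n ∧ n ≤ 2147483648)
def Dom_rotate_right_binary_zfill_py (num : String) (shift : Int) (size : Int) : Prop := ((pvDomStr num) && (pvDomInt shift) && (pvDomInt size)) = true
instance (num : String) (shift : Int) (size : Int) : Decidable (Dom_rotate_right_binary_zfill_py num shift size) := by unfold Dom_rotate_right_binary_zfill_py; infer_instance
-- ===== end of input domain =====

-- B replaces A's per-index left-bit/right-bit OR reconstruction loop by one per-char
-- normalization pass followed by a two-slice rotation concatenation (objective: simpler).

-- ===== PORT A =====
def rotate_right_binary_zfill_py (num : String) (shift : Int) (size : Int) : String :=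
  if size < 0 then "" -- Python raises ValueError here; excluded by Pre_
  else if size = 0 then ""
  else
    let cs : List Char :=
      if PySem.Str.len num < size then PySem.Chars.zfill num.toList size else num.toList
    let s := PySem.Int.mod shift size
    let toJoin := (PySem.List.pyRange 0 size 1).foldl (fun acc i =>
      let leftBit : Char := if i - s ≥ 0 then PySem.List.pyGetD cs (i - s) '0' else '0'
      let rightBit : Char := if i + size - s < size then PySem.List.pyGetD cs (i + size - s) '0' else '0'
      acc ++ [if leftBit = '1' ∨ rightBit = '1' then '1' else '0']) []
    String.ofList toJoin

-- ===== PORT B =====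
def rotate_right_binary_zfill_py_alt (num : String) (shift : Int) (size : Int) : String :=
  if size < 0 then "" -- B raises ValueError here too; excluded by Pre_
  else if size = 0 then ""
  else
    let cs : List Char :=
      if PySem.Str.len num < size then PySem.Chars.zfill num.toList size else num.toList
    let bits := (PySem.List.slice cs none (some size)).map (fun c => if c = '1' then '1' else '0')
    let k := size - PySem.Int.mod shift size
    String.ofList (PySem.List.slice bits (some k) none ++ PySem.List.slice bits none (some k))

-- ===== PRECONDITION & SPEC =====
-- A raises ValueError exactly when size < 0; both programs return on every other input.
def Pre_rotate_right_binary_zfill_py (num : String) (shift : Int) (size : Int) : Prop := 0 ≤ size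
instance (num : String) (shift : Int) (size : Int) : Decidable (Pre_rotate_right_binary_zfill_py num shift size) := by unfold Pre_rotate_right_binary_zfill_py; infer_instance

def pvWitness_rotate_right_binary_zfill_py : String × Int × Int := ("1011", 1, 4)

def Spec_rotate_right_binary_zfill_py (num : String) (shift : Int) (size : Int) (out : String) : Prop := out = rotate_right_binary_zfill_py_alt num shift size
instance (num : String) (shift : Int) (size : Int) (out : String) : Decidable (Spec_rotate_right_binary_zfill_py num shift size out) := by unfold Spec_rotate_right_binary_zfill_py; infer_instance

-- ===== CLAIM (what is proved, stated in full; the proofs are below) =====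
def Claim_equal_rotate_right_binary_zfill_py : Prop := ∀ (num : String) (shift : Int) (size : Int), Dom_rotate_right_binary_zfill_py num shift size → Pre_rotate_right_binary_zfill_py num shift size → Spec_rotate_right_binary_zfill_py num shift size (rotate_right_binary_zfill_py num shift size)

-- ===== LEMMAS AND PROOFS =====

-- Core list-level fact: A's reconstruction loop over indices builds exactly B's
-- two-slice rotation of the normalized first `size` characters.
theorem pv_core (cs : List Char) (shift size : Int) (hpos : 0 < size)
    (hlen : size.toNat ≤ cs.length) :
    (PySem.List.pyRange 0 size 1).foldl (fun acc i =>
      let leftBit : Char := if i - PySem.Int.mod shift size ≥ 0 then PySem.List.pyGetD cs (i - PySem.Int.mod shift size) '0' else '0'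
      let rightBit : Char := if i + size - PySem.Int.mod shift size < size then PySem.List.pyGetD cs (i + size - PySem.Int.mod shift size) '0' else '0'
      acc ++ [if leftBit = '1' ∨ rightBit = '1' then '1' else '0']) []
    = PySem.List.slice ((PySem.List.slice cs none (some size)).map (fun c => if c = '1' then '1' else '0')) (some (size - PySem.Int.mod shift size)) none
      ++ PySem.List.slice ((PySem.List.slice cs none (some size)).map (fun c => if c = '1' then '1' else '0')) none (some (size - PySem.Int.mod shift size)) := by
  have hs0 : 0 ≤ PySem.Int.mod shift size := PySem.Int.mod_nonneg shift hpos
  have hs1 : PySem.Int.mod shift size < size := PySem.Int.mod_lt shift hpos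
  set s := PySem.Int.mod shift size with hsdef
  rw [PySem.List.foldl_append_singleton_eq_map, List.nil_append,
      PySem.List.slice_to cs (show (0:Int) ≤ size by omega)]
  set bits := (cs.take size.toNat).map (fun c => if c = '1' then '1' else '0') with hbits
  rw [PySem.List.slice_from bits (show (0:Int) ≤ size - s by omega),
      PySem.List.slice_to bits (show (0:Int) ≤ size - s by omega)]
  have hbl : bits.length = size.toNat := by
    simp [hbits]; omega
  apply List.ext_getElem
  · simp [PySem.List.length_pyRange_one, hbl]; omega
  · intro i h1 h2
    have hi : i < size.toNat := by
      simpa [PySem.List.length_pyRange_one] using h1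
    have hbit : ∀ (j : Nat) (hj : j < size.toNat), bits[j]'(by omega) =
        (fun c => if c = '1' then '1' else '0') (cs[j]'(by omega)) := by
      intro j hj
      simp [hbits, List.getElem_take]
    rw [List.getElem_map, PySem.List.getElem_pyRange_one]
    simp only [zero_add]
    by_cases hcase : (s.toNat : Int) ≤ (i : Int)
    · -- i ≥ shift: left bit is cs[i-s], right branch is out of range
      have hL : ((i : Int) - s ≥ 0) := by omega
      have hR : ¬ ((i : Int) + size - s < size) := by omega
      rw [if_pos hL, if_neg hR,
          PySem.List.pyGetD_eq_getElem cs '0' (by omega) (by omega)]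
      have hidx : ((i : Int) - s).toNat = i - s.toNat := by omega
      rw [List.getElem_append_right (by simp [hbl]; omega)]
      simp only [List.length_drop, hbl]
      rw [List.getElem_take, hbit (i - (size.toNat - (size - s).toNat)) (by omega)]
      simp only [hidx, show i - (size.toNat - (size - s).toNat) = i - s.toNat from by omega]
      simp
    · -- i < shift: right bit is cs[i+size-s]
      have hL : ¬ ((i : Int) - s ≥ 0) := by omega
      have hR : ((i : Int) + size - s < size) := by omega
      rw [if_neg hL, if_pos hR,
          PySem.List.pyGetD_eq_getElem cs '0' (by omega) (by omega)]
      rw [List.getElem_append_left (by simp [hbl]; omega)]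
      rw [List.getElem_drop, hbit ((size - s).toNat + i) (by omega)]
      simp only [show ((i : Int) + size - s).toNat = (size - s).toNat + i from by omega]
      simp

-- ===== VERDICT (by name: the statement is the Claim_ definition above) =====
theorem rotate_right_binary_zfill_py_spec : Claim_equal_rotate_right_binary_zfill_py := by
  intro num shift size _ hpre
  unfold Spec_rotate_right_binary_zfill_py
  unfold rotate_right_binary_zfill_py rotate_right_binary_zfill_py_alt
  rcases lt_or_eq_of_le hpre with hpos | hzero
  · rw [if_neg (show ¬ size < 0 by omega), if_neg (show ¬ size = 0 by omega),
        if_neg (show ¬ size < 0 by omega), if_neg (show ¬ size = 0 by omega)]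
    have hlen : size.toNat ≤ (if PySem.Str.len num < size then PySem.Chars.zfill num.toList size else num.toList).length := by
      split_ifs with h
      · rw [PySem.Chars.length_zfill]; exact le_max_right _ _
      · rw [PySem.Str.len_eq] at h; omega
    exact congrArg String.ofList (pv_core _ shift size hpos hlen)
  · subst hzero
    simp
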